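-- pv_equiv track=rewrite | github.com/sethgreen23/python_projects | random/0_lambda_map_filter_reduce.py | count_h_t
-- ===== SOURCE A (Python) =====
-- def count_h_t(my_list):
--     Heads = 0
--     Tails = 0
--     for x in my_list:
--         if x == 'H':
--             Heads += 1
--         else:
--             Tails += 1
--     return (Heads, Tails)
-- ===== SOURCE B (Python) =====
-- def count_h_t(my_list):
--     # Staged decomposition: partition the list into the 'H' group and the
--     # non-'H' group, then report the group sizes.
--     heads_group = [x for x in my_list if x == 'H']
--     tails_group = [x for x in my_list if x != 'H']
--     return (len(heads_group), len(tails_group))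
-- ===== Notes on version B (the rewrite author's own statement) =====
-- stated objective: alternative
-- what changed: Replaces the single pass with two running counters by two staged filtering passes that materialize the 'H' group and the non-'H' group and return their lengths.
import Mathlib
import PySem

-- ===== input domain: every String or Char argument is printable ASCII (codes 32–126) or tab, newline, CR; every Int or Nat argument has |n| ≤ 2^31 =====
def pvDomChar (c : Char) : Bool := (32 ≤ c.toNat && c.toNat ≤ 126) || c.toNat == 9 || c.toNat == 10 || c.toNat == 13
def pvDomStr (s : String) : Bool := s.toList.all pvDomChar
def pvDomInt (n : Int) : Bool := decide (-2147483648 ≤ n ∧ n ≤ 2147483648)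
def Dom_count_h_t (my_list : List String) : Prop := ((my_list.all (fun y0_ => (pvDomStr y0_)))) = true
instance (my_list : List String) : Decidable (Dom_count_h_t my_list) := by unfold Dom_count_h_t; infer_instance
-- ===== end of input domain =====

-- B partitions the list into the 'H' group and the non-'H' group by two staged
-- filtering passes and returns the group lengths (alternative decomposition).


-- ===== PORT A =====
def count_h_t (my_list : List String) : Int × Int :=
  my_list.foldl (fun (st : Int × Int) x =>
    if x == "H" then (st.1 + 1, st.2) else (st.1, st.2 + 1)) (0, 0)

-- ===== PORT B =====
def count_h_t_alt (my_list : List String) : Int × Int :=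
  let heads_group := my_list.filter (fun x => x == "H")
  let tails_group := my_list.filter (fun x => x != "H")
  ((heads_group.length : Int), (tails_group.length : Int))

-- ===== PRECONDITION & SPEC =====
def Spec_count_h_t (my_list : List String) (out : Int × Int) : Prop := out = count_h_t_alt my_list
instance (my_list : List String) (out : Int × Int) : Decidable (Spec_count_h_t my_list out) := by unfold Spec_count_h_t; infer_instance

-- ===== CLAIM =====
def Claim_equal_count_h_t : Prop := ∀ (my_list : List String), Dom_count_h_t my_list → Spec_count_h_t my_list (count_h_t my_list)

-- ===== LEMMAS AND PROOFS =====
theorem count_h_t_gen (l : List String) (h t : Int) :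
    l.foldl (fun (st : Int × Int) x =>
      if x == "H" then (st.1 + 1, st.2) else (st.1, st.2 + 1)) (h, t)
      = (h + ((l.filter (fun x => x == "H")).length : Int),
         t + ((l.filter (fun x => x != "H")).length : Int)) := by
  induction l generalizing h t with
  | nil => simp
  | cons a l ih =>
      simp only [List.foldl_cons, List.filter_cons]
      by_cases ha : a = "H"
      · rw [ih]; simp [ha, Prod.ext_iff]; omega
      · rw [ih]; simp [ha, Prod.ext_iff]; omega

-- ===== VERDICT =====
theorem count_h_t_spec : Claim_equal_count_h_t := by
  intro l _
  unfold Spec_count_h_t count_h_t count_h_t_alt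
  rw [count_h_t_gen]
  simp
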